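-- pv_equiv track=rewrite | github.com/projeto-de-algoritmos-2025/DeC_T4 | app.py | median_cut
-- ===== SOURCE A (Python) =====
-- import math
--
-- def kth_smallest_element(pixel_list, k, channel):
--     """
--     Encontra o k-ésimo menor pixel com base em um 'channel' (0=R, 1=G, 2=B)
--     """
--
--     # Caso base: para listas pequenas, apenas ordene e retorne.
--     if len(pixel_list) <= 10:
--         sorted_list = sorted(pixel_list, key=lambda p: p[channel])
--         return sorted_list[k]
--
--     # Agrupar os números em conjuntos de 5
--     chunks = [pixel_list[i:i + 5] for i in range(0, len(pixel_list), 5)]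
--
--     # Encontrar a mediana de cada grupo
--     medians = []
--     for chunk in chunks:
--         sorted_chunk = sorted(chunk, key=lambda p: p[channel])
--         median = sorted_chunk[len(sorted_chunk) // 2]
--         medians.append(median)
--
--     # Encontrar a mediana das medianas (MOM) recursivamente
--     mom = kth_smallest_element(medians, len(medians) // 2, channel)
--     mom_value = mom[channel]
--
--     # Particionar os dados originais em torno do MOM
--     L = [p for p in pixel_list if p[channel] < mom_value]
--     R = [p for p in pixel_list if p[channel] > mom_value]
--     M = [p for p in pixel_list if p[channel] == mom_value]
--
--     # Retornar ou recorrer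
--     if k < len(L):
--         # O k-ésimo está no conjunto L
--         return kth_smallest_element(L, k, channel)
--     elif k < len(L) + len(M):
--         # O k-ésimo é o próprio MOM
--         return mom
--     else:
--         # O k-ésimo está no conjunto R
--         return kth_smallest_element(R, k - len(L) - len(M), channel)
--
-- def median_cut(pixels, num_colors):
--     """
--     Constrói uma paleta de 'num_colors' a partir da lista de pixels.
--     """
--     # Balde de pixels
--     buckets = [pixels]
--
--     num_splits = int(math.log2(num_colors))
--
--     for _ in range(num_splits):
--         new_buckets = []
--         for bucket in buckets:
--             if not bucket:
--                 continue
--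
--             # Encontrar o canal (R, G ou B) com a maior variação
--             min_r = min(p[0] for p in bucket)
--             max_r = max(p[0] for p in bucket)
--             min_g = min(p[1] for p in bucket)
--             max_g = max(p[1] for p in bucket)
--             min_b = min(p[2] for p in bucket)
--             max_b = max(p[2] for p in bucket)
--
--             range_r = max_r - min_r
--             range_g = max_g - min_g
--             range_b = max_b - min_b
--
--             # Escolhe o canal com maior variação
--             channel = 0 # Red
--             if range_g > range_r and range_g > range_b:
--                 channel = 1 # Green
--             elif range_b > range_r and range_b > range_g:
--                 channel = 2 # Blue
--
--             # Encontrar a mediana do canal escolhido usando MOM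
--             k = len(bucket) // 2
--             median_pixel = kth_smallest_element(bucket, k, channel)
--             median_value = median_pixel[channel]
--
--             # Dividir o balde em dois com base na mediana
--             b1 = [p for p in bucket if p[channel] <= median_value]
--             b2 = [p for p in bucket if p[channel] > median_value]
--
--             new_buckets.extend([b1, b2])
--         buckets = new_buckets
--
--     # Criar a paleta final calculando a média de cada balde
--     palette = []
--     for bucket in buckets:
--         if not bucket:
--             continue
--         avg_r = sum(p[0] for p in bucket) // len(bucket)
--         avg_g = sum(p[1] for p in bucket) // len(bucket)
--         avg_b = sum(p[2] for p in bucket) // len(bucket)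
--         palette.append((avg_r, avg_g, avg_b))
--
--     return palette
-- ===== SOURCE B (Python) =====
-- import math
--
-- def median_cut(pixels, num_colors):
--     """
--     Constroi uma paleta de 'num_colors' a partir da lista de pixels.
--     Selection by sorting instead of median-of-medians; recursive depth-first
--     splitting instead of the iterative round-by-round bucket loop.
--     """
--     num_splits = int(math.log2(num_colors))
--
--     def split(bucket, depth):
--         if depth == 0:
--             return [bucket]
--         if not bucket:
--             return []
--         min_r = min(p[0] for p in bucket)
--         max_r = max(p[0] for p in bucket)
--         min_g = min(p[1] for p in bucket)
--         max_g = max(p[1] for p in bucket)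
--         min_b = min(p[2] for p in bucket)
--         max_b = max(p[2] for p in bucket)
--
--         range_r = max_r - min_r
--         range_g = max_g - min_g
--         range_b = max_b - min_b
--
--         channel = 0
--         if range_g > range_r and range_g > range_b:
--             channel = 1
--         elif range_b > range_r and range_b > range_g:
--             channel = 2
--
--         s = sorted(bucket, key=lambda p: p[channel])
--         median_value = s[len(bucket) // 2][channel]
--
--         b1 = [p for p in bucket if p[channel] <= median_value]
--         b2 = [p for p in bucket if p[channel] > median_value]
--         return split(b1, depth - 1) + split(b2, depth - 1)
--
--     palette = []
--     for bucket in split(pixels, num_splits):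
--         if not bucket:
--             continue
--         avg_r = sum(p[0] for p in bucket) // len(bucket)
--         avg_g = sum(p[1] for p in bucket) // len(bucket)
--         avg_b = sum(p[2] for p in bucket) // len(bucket)
--         palette.append((avg_r, avg_g, avg_b))
--
--     return palette
-- ===== Notes on version B (the rewrite author's own statement) =====
-- stated objective: simpler
-- what changed: Replaces the recursive median-of-medians selection helper with a direct sort-based median (sorted(bucket, key)[len//2][channel]) and the iterative round-by-round bucket loop with a recursive depth-first split function.
import Mathlib
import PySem

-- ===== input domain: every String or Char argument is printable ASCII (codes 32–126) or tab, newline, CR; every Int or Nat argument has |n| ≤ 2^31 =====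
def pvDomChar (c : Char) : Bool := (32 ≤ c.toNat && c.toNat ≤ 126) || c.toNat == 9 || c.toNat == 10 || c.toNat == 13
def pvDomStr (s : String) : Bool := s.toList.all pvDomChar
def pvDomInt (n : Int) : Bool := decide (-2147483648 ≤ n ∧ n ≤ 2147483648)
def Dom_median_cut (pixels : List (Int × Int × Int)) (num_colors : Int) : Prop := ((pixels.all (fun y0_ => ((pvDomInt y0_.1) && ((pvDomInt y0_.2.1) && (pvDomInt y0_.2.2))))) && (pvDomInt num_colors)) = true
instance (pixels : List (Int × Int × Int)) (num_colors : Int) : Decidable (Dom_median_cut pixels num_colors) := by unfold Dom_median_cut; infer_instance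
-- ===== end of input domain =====

-- B replaces A's median-of-medians selection with a sort-based median and the
-- iterative round-by-round bucket loop with recursive depth-first splitting
-- (objective: simpler); return values agree, proved below.

-- ===== PORT A =====

-- p[channel] on an RGB triple (channel is 0, 1 or 2)
def pvChan (c : Nat) (p : Int × Int × Int) : Int :=
  if c = 0 then p.1 else if c = 1 then p.2.1 else p.2.2

-- A's kth_smallest_element.  `fuel` is ONLY a totality guard for Lean
-- (Python's recursion terminates on all inputs median_cut feeds it; fuel ≥
-- pixel_list.length is proved sufficient below, so the fuel-0 default is never reached).
-- the chunks comprehension [pixel_list[i:i+5] for i in range(0, len(pixel_list), 5)]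
def pvChunks (pixel_list : List (Int × Int × Int)) : List (List (Int × Int × Int)) :=
  (PySem.List.pyRange 0 (pixel_list.length : Int) 5).map
    (fun i => PySem.List.slice pixel_list (some i) (some (i + 5)))

-- the medians loop of kth_smallest_element
def pvMedians (pixel_list : List (Int × Int × Int)) (channel : Nat) : List (Int × Int × Int) :=
  (pvChunks pixel_list).foldl (fun acc chunk =>
    acc ++ [PySem.List.pyGetD (PySem.List.sorted chunk (pvChan channel) false)
      (PySem.Int.floordiv (((PySem.List.sorted chunk (pvChan channel) false).length : Int)) 2)
      (0, 0, 0)]) []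

def kthSmallest (fuel : Nat) (pixel_list : List (Int × Int × Int)) (k : Int) (channel : Nat) :
    Int × Int × Int :=
  match fuel with
  | 0 => (0, 0, 0)
  | fuel + 1 =>
    if pixel_list.length ≤ 10 then
      PySem.List.pyGetD (PySem.List.sorted pixel_list (pvChan channel) false) k (0, 0, 0)
    else
      let medians := pvMedians pixel_list channel
      let mom := kthSmallest fuel medians (PySem.Int.floordiv ((medians.length : Int)) 2) channel
      let mom_value := pvChan channel mom
      let L := pixel_list.filter (fun p => decide (pvChan channel p < mom_value))
      let R := pixel_list.filter (fun p => decide (mom_value < pvChan channel p))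
      let M := pixel_list.filter (fun p => decide (pvChan channel p = mom_value))
      if k < (L.length : Int) then
        kthSmallest fuel L k channel
      else if k < (L.length : Int) + (M.length : Int) then
        mom
      else
        kthSmallest fuel R (k - (L.length : Int) - (M.length : Int)) channel

-- the channel-with-largest-range block (identical lines in Source A and Source B);
-- the .getD 0 defaults are unreachable: both callers guard bucket ≠ []
def pvChannelOf (bucket : List (Int × Int × Int)) : Nat :=
  let min_r := (PySem.List.min? (bucket.map (fun p => p.1)) (fun x => x)).getD 0
  let max_r := (PySem.List.max? (bucket.map (fun p => p.1)) (fun x => x)).getD 0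
  let min_g := (PySem.List.min? (bucket.map (fun p => p.2.1)) (fun x => x)).getD 0
  let max_g := (PySem.List.max? (bucket.map (fun p => p.2.1)) (fun x => x)).getD 0
  let min_b := (PySem.List.min? (bucket.map (fun p => p.2.2)) (fun x => x)).getD 0
  let max_b := (PySem.List.max? (bucket.map (fun p => p.2.2)) (fun x => x)).getD 0
  let range_r := max_r - min_r
  let range_g := max_g - min_g
  let range_b := max_b - min_b
  if range_g > range_r ∧ range_g > range_b then 1
  else if range_b > range_r ∧ range_b > range_g then 2
  else 0

-- one pass of A's `for bucket in buckets` body (builds new_buckets)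
def pvRound (buckets : List (List (Int × Int × Int))) : List (List (Int × Int × Int)) :=
  buckets.foldl (fun new_buckets bucket =>
    if bucket = [] then new_buckets
    else
      let channel := pvChannelOf bucket
      let median_value := pvChan channel
        (kthSmallest bucket.length bucket (PySem.Int.floordiv ((bucket.length : Int)) 2) channel)
      new_buckets ++ [bucket.filter (fun p => decide (pvChan channel p ≤ median_value)),
                      bucket.filter (fun p => decide (median_value < pvChan channel p))]) []

def median_cut (pixels : List (Int × Int × Int)) (num_colors : Int) : List (Int × Int × Int) :=
  if 1 ≤ num_colors then
    -- int(math.log2(num_colors)): exact floor-log2 for 1 ≤ num_colors ≤ 2^31 (the Dom bound)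
    let num_splits := Nat.log2 num_colors.toNat
    let buckets := (PySem.List.pyRange 0 (num_splits : Int) 1).foldl
      (fun bs _ => pvRound bs) [pixels]
    buckets.foldl (fun palette bucket =>
      if bucket = [] then palette
      else palette ++ [(PySem.Int.floordiv ((bucket.map (fun p => p.1)).sum) ((bucket.length : Int)),
                        PySem.Int.floordiv ((bucket.map (fun p => p.2.1)).sum) ((bucket.length : Int)),
                        PySem.Int.floordiv ((bucket.map (fun p => p.2.2)).sum) ((bucket.length : Int)))]) []
  else []  -- math.log2 raises ValueError for num_colors < 1; excluded by Pre_

-- ===== PORT B =====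

-- Source B's recursive split(bucket, depth)
def pvSplit (bucket : List (Int × Int × Int)) (depth : Nat) : List (List (Int × Int × Int)) :=
  match depth with
  | 0 => [bucket]
  | d + 1 =>
    if bucket = [] then []
    else
      let channel := pvChannelOf bucket
      let median_value := pvChan channel
        (PySem.List.pyGetD (PySem.List.sorted bucket (pvChan channel) false)
          (PySem.Int.floordiv ((bucket.length : Int)) 2) (0, 0, 0))
      pvSplit (bucket.filter (fun p => decide (pvChan channel p ≤ median_value))) d ++
      pvSplit (bucket.filter (fun p => decide (median_value < pvChan channel p))) d

def median_cut_alt (pixels : List (Int × Int × Int)) (num_colors : Int) : List (Int × Int × Int) :=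
  if 1 ≤ num_colors then
    let num_splits := Nat.log2 num_colors.toNat
    (pvSplit pixels num_splits).foldl (fun palette bucket =>
      if bucket = [] then palette
      else palette ++ [(PySem.Int.floordiv ((bucket.map (fun p => p.1)).sum) ((bucket.length : Int)),
                        PySem.Int.floordiv ((bucket.map (fun p => p.2.1)).sum) ((bucket.length : Int)),
                        PySem.Int.floordiv ((bucket.map (fun p => p.2.2)).sum) ((bucket.length : Int)))]) []
  else []

-- ===== PRECONDITION & SPEC =====
-- Pre_ excludes num_colors < 1, where math.log2 raises ValueError in both programs.
def Pre_median_cut (pixels : List (Int × Int × Int)) (num_colors : Int) : Prop := 1 ≤ num_colors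
instance (pixels : List (Int × Int × Int)) (num_colors : Int) : Decidable (Pre_median_cut pixels num_colors) := by unfold Pre_median_cut; infer_instance
def pvWitness_median_cut : (List (Int × Int × Int)) × Int := ([(1, 2, 3), (10, 5, 6), (0, 0, 7)], 2)

def Spec_median_cut (pixels : List (Int × Int × Int)) (num_colors : Int) (out : List (Int × Int × Int)) : Prop := out = median_cut_alt pixels num_colors
instance (pixels : List (Int × Int × Int)) (num_colors : Int) (out : List (Int × Int × Int)) : Decidable (Spec_median_cut pixels num_colors out) := by unfold Spec_median_cut; infer_instance

-- ===== CLAIM (what is proved, stated in full; the proofs are below) =====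
def Claim_equal_median_cut : Prop := ∀ (pixels : List (Int × Int × Int)) (num_colors : Int), Dom_median_cut pixels num_colors → Pre_median_cut pixels num_colors → Spec_median_cut pixels num_colors (median_cut pixels num_colors)

-- ===== LEMMAS AND PROOFS =====

-- the three strict-trichotomy filters split the length exactly
lemma pv_len_filter3 (L : List (Int × Int × Int)) (f : (Int × Int × Int) → Int) (v : Int) :
    (L.filter (fun p => decide (f p < v))).length + (L.filter (fun p => decide (f p = v))).length +
      (L.filter (fun p => decide (v < f p))).length = L.length := by
  induction L with
  | nil => simp
  | cons a t ih =>
    by_cases h1 : f a < v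
    · simp [h1, ne_of_lt h1, lt_asymm h1]; omega
    · by_cases h2 : f a = v
      · simp [h2]; omega
      · have h3 : v < f a := by omega
        simp [h1, h2, h3]; omega

-- key values of a key-sorted list = sorted list of key values
lemma pv_sorted_map_chan (L : List (Int × Int × Int)) (c : Nat) :
    (PySem.List.sorted L (pvChan c) false).map (pvChan c) =
      PySem.List.sorted (L.map (pvChan c)) (fun x => x) false := by
  refine (PySem.List.sorted_id_eq_of_perm_of_pairwise _ _ ?_ ?_).symm
  · exact (PySem.List.sorted_perm L (pvChan c) false).map (pvChan c)
  · exact PySem.List.sorted_map_key_pairwise L (pvChan c)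

-- sorted(vs) decomposes around any pivot value v into the <v, =v, >v blocks
lemma pv_partition3 (vs : List Int) (v : Int) :
    PySem.List.sorted vs (fun x => x) false =
      PySem.List.sorted (vs.filter (fun x => decide (x < v))) (fun x => x) false ++
        (vs.filter (fun x => decide (x = v)) ++
          PySem.List.sorted (vs.filter (fun x => decide (v < x))) (fun x => x) false) := by
  have hM : (vs.filter (fun x => !decide (x < v))).filter (fun x => decide (x = v)) =
      vs.filter (fun x => decide (x = v)) := by
    rw [List.filter_filter]
    exact List.filter_congr (fun x _ => by by_cases h : x = v <;> simp [h])
  have hB : (vs.filter (fun x => !decide (x < v))).filter (fun x => !decide (x = v)) =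
      vs.filter (fun x => decide (v < x)) := by
    rw [List.filter_filter]
    refine List.filter_congr (fun x _ => ?_)
    by_cases h1 : x < v
    · simp [h1, ne_of_lt h1, lt_asymm h1]
    · by_cases h2 : x = v
      · simp [h2]
      · have h3 : v < x := by omega
        simp [h1, h2, h3]
  have memA : ∀ a ∈ PySem.List.sorted (vs.filter (fun x => decide (x < v))) (fun x => x) false,
      a < v := by
    intro a ha
    have := (PySem.List.mem_sorted _ _ _ _).1 ha
    simpa using (List.mem_filter.1 this).2
  have memM : ∀ a ∈ vs.filter (fun x => decide (x = v)), a = v := by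
    intro a ha; simpa using (List.mem_filter.1 ha).2
  have memB : ∀ a ∈ PySem.List.sorted (vs.filter (fun x => decide (v < x))) (fun x => x) false,
      v < a := by
    intro a ha
    have := (PySem.List.mem_sorted _ _ _ _).1 ha
    simpa using (List.mem_filter.1 this).2
  apply PySem.List.sorted_id_eq_of_perm_of_pairwise
  · have h2 := List.filter_append_perm (fun x => decide (x = v))
      (vs.filter (fun x => !decide (x < v)))
    rw [hM, hB] at h2
    have h1 := List.filter_append_perm (fun x => decide (x < v)) vs
    refine ((PySem.List.sorted_perm _ _ _).append
      ((PySem.List.sorted_perm _ _ _).append_left _)).trans ?_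
    exact ((h2.append_left _).trans ((List.Perm.append_right _ (List.Perm.refl _)))).trans h1
  · rw [List.pairwise_append, List.pairwise_append]
    refine ⟨by simpa using PySem.List.sorted_pairwise _ (fun x : Int => x),
      ⟨List.pairwise_of_forall_mem_list (fun a ha b hb => by rw [memM a ha, memM b hb]),
       by simpa using PySem.List.sorted_pairwise _ (fun x : Int => x),
       fun a ha b hb => le_of_lt (lt_of_le_of_lt (le_of_eq (memM a ha)) (memB b hb))⟩,
      fun a ha b hb => ?_⟩
    rcases List.mem_append.1 hb with hb | hb
    · exact le_of_lt (lt_of_lt_of_le (memA a ha) (le_of_eq (memM b hb).symm))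
    · exact le_of_lt (lt_trans (memA a ha) (memB b hb))

-- the channel value of B's sort-based selection, in canonical form
lemma pv_sortSel_eq (L : List (Int × Int × Int)) (c : Nat) (k : Int)
    (h0 : 0 ≤ k) (h1 : k < (L.length : Int)) :
    pvChan c (PySem.List.pyGetD (PySem.List.sorted L (pvChan c) false) k (0, 0, 0)) =
      (PySem.List.sorted (L.map (pvChan c)) (fun x => x) false).getD k.toNat 0 := by
  have hlen : (PySem.List.sorted L (pvChan c) false).length = L.length :=
    PySem.List.length_sorted L (pvChan c) false
  rw [PySem.List.pyGetD_eq_getElem _ _ h0 (by rw [hlen]; exact h1)]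
  have hk : k.toNat < (PySem.List.sorted L (pvChan c) false).length := by omega
  have hk2 : k.toNat < (PySem.List.sorted (L.map (pvChan c)) (fun x => x) false).length := by
    rw [PySem.List.length_sorted, List.length_map]; omega
  rw [List.getD_eq_getElem _ _ hk2, ← List.getElem_map (pvChan c) (h := by simpa using hk)]
  congr 1
  exact pv_sorted_map_chan L c


-- floor(len//2) on a Nat-length cast
lemma pv_fd2 (m : Nat) : PySem.Int.floordiv ((m : Int)) 2 = ((m / 2 : Nat) : Int) := by
  exact_mod_cast PySem.Int.floordiv_natCast m 2

-- filtering the channel values = channel values of the filtered pixels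
lemma pv_filter_map_lt (L : List (Int × Int × Int)) (c : Nat) (v : Int) :
    (L.map (pvChan c)).filter (fun x => decide (x < v)) =
      (L.filter (fun p => decide (pvChan c p < v))).map (pvChan c) := by
  rw [List.filter_map]; rfl

lemma pv_filter_map_eq (L : List (Int × Int × Int)) (c : Nat) (v : Int) :
    (L.map (pvChan c)).filter (fun x => decide (x = v)) =
      (L.filter (fun p => decide (pvChan c p = v))).map (pvChan c) := by
  rw [List.filter_map]; rfl

lemma pv_filter_map_gt (L : List (Int × Int × Int)) (c : Nat) (v : Int) :
    (L.map (pvChan c)).filter (fun x => decide (v < x)) =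
      (L.filter (fun p => decide (v < pvChan c p))).map (pvChan c) := by
  rw [List.filter_map]; rfl

-- the j-th sorted channel value, by position relative to the pivot blocks
lemma pv_getD_lt (L : List (Int × Int × Int)) (c : Nat) (v : Int) (j : Nat)
    (hj : j < (L.filter (fun p => decide (pvChan c p < v))).length) :
    (PySem.List.sorted (L.map (pvChan c)) (fun x => x) false).getD j 0 =
      (PySem.List.sorted ((L.filter (fun p => decide (pvChan c p < v))).map (pvChan c))
        (fun x => x) false).getD j 0 := by
  rw [pv_partition3 (L.map (pvChan c)) v, pv_filter_map_lt]
  exact List.getD_append _ _ _ _ (by rw [PySem.List.length_sorted, List.length_map]; omega)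

lemma pv_getD_eq (L : List (Int × Int × Int)) (c : Nat) (v : Int) (j : Nat)
    (h1 : (L.filter (fun p => decide (pvChan c p < v))).length ≤ j)
    (h2 : j < (L.filter (fun p => decide (pvChan c p < v))).length +
      (L.filter (fun p => decide (pvChan c p = v))).length) :
    (PySem.List.sorted (L.map (pvChan c)) (fun x => x) false).getD j 0 = v := by
  rw [pv_partition3 (L.map (pvChan c)) v, pv_filter_map_lt, pv_filter_map_eq]
  have hlA : (PySem.List.sorted ((L.filter (fun p => decide (pvChan c p < v))).map (pvChan c))
      (fun x => x) false).length = (L.filter (fun p => decide (pvChan c p < v))).length := by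
    rw [PySem.List.length_sorted, List.length_map]
  rw [List.getD_append_right _ _ _ _ (by omega), hlA]
  have hb : j - (L.filter (fun p => decide (pvChan c p < v))).length <
      ((L.filter (fun p => decide (pvChan c p = v))).map (pvChan c)).length := by
    rw [List.length_map]; omega
  rw [List.getD_append _ _ _ _ hb, List.getD_eq_getElem _ _ hb]
  have hmem := List.getElem_mem hb
  rcases List.mem_map.1 hmem with ⟨p, hp, hpe⟩
  rw [← hpe]
  simpa using (List.mem_filter.1 hp).2

lemma pv_getD_gt (L : List (Int × Int × Int)) (c : Nat) (v : Int) (j : Nat)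
    (h1 : (L.filter (fun p => decide (pvChan c p < v))).length +
      (L.filter (fun p => decide (pvChan c p = v))).length ≤ j) :
    (PySem.List.sorted (L.map (pvChan c)) (fun x => x) false).getD j 0 =
      (PySem.List.sorted ((L.filter (fun p => decide (v < pvChan c p))).map (pvChan c))
        (fun x => x) false).getD
        (j - (L.filter (fun p => decide (pvChan c p < v))).length -
          (L.filter (fun p => decide (pvChan c p = v))).length) 0 := by
  rw [pv_partition3 (L.map (pvChan c)) v, pv_filter_map_lt, pv_filter_map_eq, pv_filter_map_gt]
  have hlA : (PySem.List.sorted ((L.filter (fun p => decide (pvChan c p < v))).map (pvChan c))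
      (fun x => x) false).length = (L.filter (fun p => decide (pvChan c p < v))).length := by
    rw [PySem.List.length_sorted, List.length_map]
  have hlM : ((L.filter (fun p => decide (pvChan c p = v))).map (pvChan c)).length =
      (L.filter (fun p => decide (pvChan c p = v))).length := List.length_map ..
  rw [List.getD_append_right _ _ _ _ (by omega), List.getD_append_right _ _ _ _ (by omega),
    hlA, hlM]

-- each chunk is a nonempty slice of pixel_list
lemma pv_chunk_facts (L : List (Int × Int × Int)) :
    ∀ chunk ∈ pvChunks L, chunk ≠ [] ∧ ∀ x ∈ chunk, x ∈ L := by
  intro chunk hc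
  unfold pvChunks at hc
  rcases List.mem_map.1 hc with ⟨i, hi, rfl⟩
  obtain ⟨hi0, hin, -⟩ := (PySem.List.mem_pyRange_iff_of_pos (by norm_num) i).1 hi
  refine ⟨?_, fun x hx => PySem.List.mem_of_mem_slice _ _ _ hx⟩
  apply List.ne_nil_of_length_pos
  rw [PySem.List.length_slice]
  have c1 : PySem.List.clampIdx L.length i = i.toNat := by
    unfold PySem.List.clampIdx; split_ifs <;> omega
  have c2 : i.toNat + 1 ≤ PySem.List.clampIdx L.length (i + 5) := by
    unfold PySem.List.clampIdx; split_ifs <;> omega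
  omega

-- medians: as many as there are chunks, and all of them pixels of L
lemma pv_medians_facts (L : List (Int × Int × Int)) (c : Nat) :
    (pvMedians L c).length = (pvChunks L).length ∧ ∀ x ∈ pvMedians L c, x ∈ L := by
  unfold pvMedians
  rw [PySem.List.foldl_append_singleton_eq_map, List.nil_append]
  refine ⟨List.length_map .., ?_⟩
  intro x hx
  rcases List.mem_map.1 hx with ⟨chunk, hc, rfl⟩
  obtain ⟨hne, hsub⟩ := pv_chunk_facts L chunk hc
  have hcl : 1 ≤ chunk.length := List.length_pos_iff.2 hne
  have hsl : (PySem.List.sorted chunk (pvChan c) false).length = chunk.length :=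
    PySem.List.length_sorted chunk (pvChan c) false
  have hmem : PySem.List.pyGetD (PySem.List.sorted chunk (pvChan c) false)
      (PySem.Int.floordiv (((PySem.List.sorted chunk (pvChan c) false).length : Int)) 2)
      (0, 0, 0) ∈ PySem.List.sorted chunk (pvChan c) false := by
    apply PySem.List.pyGetD_mem
    rw [hsl, pv_fd2]
    refine ⟨by omega, ?_⟩
    exact_mod_cast Nat.div_lt_self (by omega) (by omega)
  exact hsub _ ((PySem.List.mem_sorted _ _ _ _).1 hmem)

-- at least one chunk, and strictly fewer chunks than pixels (n ≥ 11)
lemma pv_chunks_card (L : List (Int × Int × Int)) (h : 11 ≤ L.length) :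
    1 ≤ (pvChunks L).length ∧ (pvChunks L).length ≤ L.length - 1 := by
  unfold pvChunks
  rw [List.length_map, PySem.List.pyRange_of_pos _ _ (by norm_num), List.length_map,
    List.length_range]
  split_ifs with h'
  · omega
  · exfalso; apply h'; exact_mod_cast Nat.cast_pos.2 (by omega)

-- MOM selection: membership and the k-th order-statistic value (fuel ≥ length suffices)
lemma pv_kth_spec : ∀ (fuel : Nat) (L : List (Int × Int × Int)) (k : Int) (c : Nat),
    L.length ≤ fuel → 0 ≤ k → k < (L.length : Int) →
    kthSmallest fuel L k c ∈ L ∧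
    pvChan c (kthSmallest fuel L k c) =
      (PySem.List.sorted (L.map (pvChan c)) (fun x => x) false).getD k.toNat 0 := by
  intro fuel
  induction fuel with
  | zero => intro L k c hf h0 h1; exfalso; omega
  | succ f ih =>
    intro L k c hf h0 h1
    by_cases h10 : L.length ≤ 10
    · rw [kthSmallest, if_pos h10]
      refine ⟨?_, pv_sortSel_eq L c k h0 h1⟩
      have hmem : PySem.List.pyGetD (PySem.List.sorted L (pvChan c) false) k (0, 0, 0) ∈
          PySem.List.sorted L (pvChan c) false := by
        apply PySem.List.pyGetD_mem
        rw [PySem.List.length_sorted]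
        exact ⟨by omega, h1⟩
      exact (PySem.List.mem_sorted _ _ _ _).1 hmem
    · rw [kthSmallest, if_neg h10]
      dsimp only []
      obtain ⟨hmlen, hmsub⟩ := pv_medians_facts L c
      obtain ⟨hc1, hc2⟩ := pv_chunks_card L (by omega)
      set mom := kthSmallest f (pvMedians L c)
        (PySem.Int.floordiv (((pvMedians L c).length : Int)) 2) c with hmomdef
      have hmom := ih (pvMedians L c) (PySem.Int.floordiv (((pvMedians L c).length : Int)) 2) c
        (by omega) (by rw [pv_fd2]; omega)
        (by rw [pv_fd2]; exact_mod_cast Nat.div_lt_self (by omega) (by omega))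
      have hmomL : mom ∈ L := hmsub mom hmom.1
      set v := pvChan c mom with hv
      have hmomM : mom ∈ L.filter (fun p => decide (pvChan c p = v)) :=
        List.mem_filter.2 ⟨hmomL, by simp [hv]⟩
      have hMpos : 0 < (L.filter (fun p => decide (pvChan c p = v))).length :=
        List.length_pos_iff.2 (List.ne_nil_of_mem hmomM)
      have hsum := pv_len_filter3 L (pvChan c) v
      have hLle : (L.filter (fun p => decide (pvChan c p < v))).length ≤ L.length - 1 := by omega
      have hRle : (L.filter (fun p => decide (v < pvChan c p))).length ≤ L.length - 1 := by omega
      split_ifs with hk1 hk2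
      · have hih := ih (L.filter (fun p => decide (pvChan c p < v))) k c (by omega) h0 hk1
        refine ⟨List.mem_of_mem_filter hih.1, ?_⟩
        rw [hih.2, pv_getD_lt L c v k.toNat (by omega)]
      · refine ⟨hmomL, ?_⟩
        rw [pv_getD_eq L c v k.toNat (by omega) (by omega)]
      · have hk0' : 0 ≤ k - ((L.filter (fun p => decide (pvChan c p < v))).length : Int) -
            ((L.filter (fun p => decide (pvChan c p = v))).length : Int) := by omega
        have hklt : k - ((L.filter (fun p => decide (pvChan c p < v))).length : Int) -
            ((L.filter (fun p => decide (pvChan c p = v))).length : Int) <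
            ((L.filter (fun p => decide (v < pvChan c p))).length : Int) := by omega
        have hih := ih (L.filter (fun p => decide (v < pvChan c p))) _ c (by omega) hk0' hklt
        refine ⟨List.mem_of_mem_filter hih.1, ?_⟩
        rw [hih.2, pv_getD_gt L c v k.toNat (by omega)]
        congr 1
        omega

-- per nonempty bucket, A's MOM median value = B's sort median value
lemma pv_medianValue_eq (bucket : List (Int × Int × Int)) (c : Nat) (hb : bucket ≠ []) :
    pvChan c (kthSmallest bucket.length bucket (PySem.Int.floordiv ((bucket.length : Int)) 2) c) =
      pvChan c (PySem.List.pyGetD (PySem.List.sorted bucket (pvChan c) false)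
        (PySem.Int.floordiv ((bucket.length : Int)) 2) (0, 0, 0)) := by
  have hb1 : 1 ≤ bucket.length := List.length_pos_iff.2 hb
  have h0 : (0 : Int) ≤ PySem.Int.floordiv ((bucket.length : Int)) 2 := by rw [pv_fd2]; omega
  have h1 : PySem.Int.floordiv ((bucket.length : Int)) 2 < (bucket.length : Int) := by
    rw [pv_fd2]; exact_mod_cast Nat.div_lt_self (by omega) (by omega)
  rw [pv_sortSel_eq bucket c _ h0 h1, (pv_kth_spec bucket.length bucket _ c le_rfl h0 h1).2]

-- one round of A's loop = depth-1 splitting (A's MOM median = B's sort median)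
lemma pv_round_eq (bs : List (List (Int × Int × Int))) :
    pvRound bs = bs.flatMap (fun b => pvSplit b 1) := by
  unfold pvRound
  dsimp only []
  refine (PySem.List.foldl_congr_mem bs _ (fun acc b => acc ++ pvSplit b 1) [] ?_).trans ?_
  · intro acc b _
    dsimp only []
    by_cases hb : b = []
    · simp [hb, pvSplit]
    · rw [if_neg hb]
      have h1 : pvSplit b 1 = pvSplit b (0 + 1) := rfl
      rw [h1, pvSplit, if_neg hb]
      dsimp only []
      rw [pv_medianValue_eq b (pvChannelOf b) hb]
      simp [pvSplit]
  · rw [PySem.List.foldl_append_eq_flatMap, List.nil_append]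

-- splitting one level deeper = split once, then split the two halves
lemma pv_split_succ (b : List (Int × Int × Int)) (m : Nat) :
    pvSplit b (m + 1) = (pvSplit b 1).flatMap (fun x => pvSplit x m) := by
  by_cases hb : b = []
  · simp [hb, pvSplit]
  · have h1 : pvSplit b 1 = pvSplit b (0 + 1) := rfl
    rw [pvSplit, if_neg hb, h1, pvSplit, if_neg hb]
    simp [pvSplit]

-- n rounds of A's loop = depth-n recursive splitting of each bucket
lemma pv_iterate_split (n : Nat) : ∀ bs : List (List (Int × Int × Int)),
    pvRound^[n] bs = bs.flatMap (fun b => pvSplit b n) := by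
  induction n with
  | zero => intro bs; simp [pvSplit]
  | succ m ih =>
    intro bs
    rw [Function.iterate_succ_apply, ih (pvRound bs), pv_round_eq, List.flatMap_assoc]
    simp only [← pv_split_succ]

-- A's `for _ in range(num_splits)` loop is iteration of pvRound
lemma pv_foldl_rounds (n : Nat) (init : List (List (Int × Int × Int))) :
    (PySem.List.pyRange 0 (n : Int) 1).foldl (fun bs _ => pvRound bs) init = pvRound^[n] init := by
  rw [PySem.List.pyRange_zero_nat, List.foldl_map]
  induction n with
  | zero => simp
  | succ m ih => rw [List.range_succ, List.foldl_append, ih, Function.iterate_succ_apply']; rfl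

-- ===== VERDICT (by name: the statement is the Claim_ definition above) =====
theorem median_cut_spec : Claim_equal_median_cut := by
  intro pixels num_colors _ hpre
  show median_cut pixels num_colors = median_cut_alt pixels num_colors
  have h1 : 1 ≤ num_colors := hpre
  unfold median_cut median_cut_alt
  rw [if_pos h1, if_pos h1]
  dsimp only []
  rw [pv_foldl_rounds, pv_iterate_split]
  simp
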